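-- pv_equiv track=rewrite | github.com/zubekj/mlppi | src/helpers/feature_extraction.py | trim_leading_trailing
-- ===== SOURCE A (Python) =====
-- def trim_leading_trailing(l):
--     l = sorted(l)
--     i = 1
--     while i < len(l) and l[i] == l[i-1] + 1:
--         i += 1
--     l = l[i:]
--
--     j = -1
--     while j > -len(l) and l[j] == l[j-1] + 1:
--         j -= 1
--     l = l[:j]
--     return l
-- ===== SOURCE B (Python) =====
-- def trim_leading_trailing(l):
--     # Partition the sorted values into maximal runs of consecutive integers,
--     # then return all runs except the first and the last, flattened.
--     runs = []
--     cur = []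
--     for x in sorted(l):
--         if cur and x == cur[-1] + 1:
--             cur.append(x)
--         else:
--             if cur:
--                 runs.append(cur)
--             cur = [x]
--     if cur:
--         runs.append(cur)
--     return [x for run in runs[1:-1] for x in run]
-- ===== Notes on version B (the rewrite author's own statement) =====
-- stated objective: alternative
-- what changed: B partitions the sorted list into maximal consecutive runs in one forward pass and returns the middle runs flattened, instead of A's two index-based while loops trimming the leading run and then the trailing run via negative indices.
import Mathlib
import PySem

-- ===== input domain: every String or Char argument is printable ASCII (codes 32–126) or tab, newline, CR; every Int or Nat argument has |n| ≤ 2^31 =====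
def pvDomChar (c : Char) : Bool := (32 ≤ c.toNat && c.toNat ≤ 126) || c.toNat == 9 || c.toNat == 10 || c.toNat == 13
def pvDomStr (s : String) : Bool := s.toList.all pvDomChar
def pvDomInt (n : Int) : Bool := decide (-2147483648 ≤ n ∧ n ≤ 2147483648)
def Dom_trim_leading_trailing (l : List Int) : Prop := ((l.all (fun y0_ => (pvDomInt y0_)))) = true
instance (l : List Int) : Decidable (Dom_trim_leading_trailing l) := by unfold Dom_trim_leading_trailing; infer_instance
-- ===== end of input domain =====

-- B replaces A's two index-based trim loops by a single forward pass that partitions the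
-- sorted list into maximal consecutive runs and flattens the middle runs (objective: alternative).

-- ===== PORT A =====
-- the first while loop: i = 1; while i < len(l) and l[i] == l[i-1] + 1: i += 1
def leadLoop (s : List Int) (i : Nat) : Nat :=
  if i < s.length ∧ PySem.List.pyGet? s (i : Int) = (PySem.List.pyGet? s ((i : Int) - 1)).map (· + 1)
  then leadLoop s (i + 1)
  else i
termination_by s.length - i
decreasing_by omega

-- the second while loop: j = -1; while j > -len(l) and l[j] == l[j-1] + 1: j -= 1
def trailLoop (s : List Int) (j : Int) : Int :=
  if h : -(s.length : Int) < j ∧ PySem.List.pyGet? s j = (PySem.List.pyGet? s (j - 1)).map (· + 1)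
  then trailLoop s (j - 1)
  else j
termination_by ((s.length : Int) + j).toNat
decreasing_by
  have := h.1
  omega

def trim_leading_trailing (l : List Int) : List Int :=
  let s := PySem.List.sorted l (fun x => x) false
  let i := leadLoop s 1
  let s2 := PySem.List.slice s (some (i : Int)) none   -- l = l[i:]
  let j := trailLoop s2 (-1)
  PySem.List.slice s2 none (some j)                    -- l = l[:j]

-- ===== PORT B =====
-- loop body: if cur and x == cur[-1] + 1: cur.append(x) else: (if cur: runs.append(cur)); cur = [x]
def bstep (st : List (List Int) × List Int) (x : Int) : List (List Int) × List Int :=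
  if st.2 ≠ [] ∧ some x = (PySem.List.pyGet? st.2 (-1)).map (· + 1)
  then (st.1, st.2 ++ [x])
  else ((if st.2 ≠ [] then st.1 ++ [st.2] else st.1), [x])

def trim_leading_trailing_alt (l : List Int) : List Int :=
  let st := (PySem.List.sorted l (fun x => x) false).foldl bstep ([], [])
  let runs := if st.2 ≠ [] then st.1 ++ [st.2] else st.1   -- if cur: runs.append(cur)
  (PySem.List.slice runs (some 1) (some (-1))).flatten     -- [x for run in runs[1:-1] for x in run]

-- ===== PRECONDITION & SPEC =====
def Spec_trim_leading_trailing (l : List Int) (out : List Int) : Prop := out = trim_leading_trailing_alt l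
instance (l : List Int) (out : List Int) : Decidable (Spec_trim_leading_trailing l out) := by unfold Spec_trim_leading_trailing; infer_instance

-- ===== CLAIM (what is proved, stated in full; the proofs are below) =====
def Claim_equal_trim_leading_trailing : Prop := ∀ (l : List Int), Dom_trim_leading_trailing l → Spec_trim_leading_trailing l (trim_leading_trailing l)

-- ===== LEMMAS AND PROOFS =====

-- a run: each element is the previous one plus one
def RunF : List Int → Prop
  | [] => True
  | [_] => True
  | x :: y :: t => y = x + 1 ∧ RunF (y :: t)

-- split off the continuation of a run starting after `prev`
def splitRun (prev : Int) : List Int → List Int × List Int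
  | [] => ([], [])
  | x :: t => if x = prev + 1 then ((x :: (splitRun x t).1), (splitRun x t).2) else ([], x :: t)

theorem splitRun_snd_length_le (t : List Int) (prev : Int) : (splitRun prev t).2.length ≤ t.length := by
  induction t generalizing prev with
  | nil => simp [splitRun]
  | cons x t ih =>
    simp only [splitRun]
    split
    · exact Nat.le_succ_of_le (ih x)
    · simp

-- partition into maximal consecutive runs
def runsOf : List Int → List (List Int)
  | [] => []
  | x :: t => (x :: (splitRun x t).1) :: runsOf (splitRun x t).2
termination_by l => l.length
decreasing_by
  have := splitRun_snd_length_le t x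
  simpa using Nat.lt_succ_of_le this

theorem splitRun_append (t : List Int) (prev : Int) :
    (splitRun prev t).1 ++ (splitRun prev t).2 = t := by
  induction t generalizing prev with
  | nil => simp [splitRun]
  | cons x t ih =>
    simp only [splitRun]
    split
    · simp [ih x]
    · simp

theorem splitRun_run (t : List Int) (prev : Int) :
    RunF (prev :: (splitRun prev t).1) := by
  induction t generalizing prev with
  | nil => simp [splitRun, RunF]
  | cons x t ih =>
    simp only [splitRun]
    split
    · rename_i hx
      have := ih x
      exact (by simpa [RunF, hx] using And.intro hx this)
    · simp [RunF]

theorem splitRun_of_runF (t : List Int) (prev : Int) (h : RunF (prev :: t)) :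
    splitRun prev t = (t, []) := by
  induction t generalizing prev with
  | nil => simp [splitRun]
  | cons x t ih =>
    obtain ⟨hx, hr⟩ : x = prev + 1 ∧ RunF (x :: t) := h
    subst hx
    simp [splitRun, ih _ hr]

theorem splitRun_break (a : List Int) (c x : Int) (t : List Int)
    (hr : RunF (c :: a)) (hx : ∀ w, (c :: a).getLast? = some w → x ≠ w + 1) :
    splitRun c (a ++ x :: t) = (a, x :: t) := by
  induction a generalizing c with
  | nil =>
    have hxc : x ≠ c + 1 := hx c rfl
    simp [splitRun, hxc]
  | cons y a ih =>
    obtain ⟨hy, hr'⟩ : y = c + 1 ∧ RunF (y :: a) := hr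
    have hx' : ∀ w, (y :: a).getLast? = some w → x ≠ w + 1 := by
      intro w hw
      exact hx w (by rw [List.getLast?_cons_cons]; exact hw)
    subst hy
    simp [splitRun, ih _ hr' hx']

theorem splitRun_junction (t : List Int) (prev y : Int) (u : List Int)
    (h : (splitRun prev t).2 = y :: u) :
    ∀ w, (prev :: (splitRun prev t).1).getLast? = some w → y ≠ w + 1 := by
  induction t generalizing prev with
  | nil => simp [splitRun] at h
  | cons x t ih =>
    by_cases hx : x = prev + 1
    · have h' : (splitRun x t).2 = y :: u := by simpa [splitRun, hx] using h
      intro w hw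
      simp only [splitRun, if_pos hx] at hw
      rw [List.getLast?_cons_cons] at hw
      exact ih x h' w hw
    · have h' : x = y ∧ t = u := by simpa [splitRun, hx] using h
      intro w hw
      have hw' : w = prev := by simpa [splitRun, hx] using hw.symm
      rw [← h'.1, hw']
      exact hx

theorem runF_append_last (l : List Int) (x w : Int)
    (h : RunF l) (hw : l.getLast? = some w) (hx : x = w + 1) : RunF (l ++ [x]) := by
  induction l generalizing w with
  | nil => simp at hw
  | cons c a ih =>
    cases a with
    | nil =>
      have hwc : c = w := by simpa using hw
      subst hwc
      exact ⟨hx, trivial⟩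
    | cons y a' =>
      obtain ⟨hy, hr⟩ : y = c + 1 ∧ RunF (y :: a') := h
      have hw' : (y :: a').getLast? = some w := by rw [← hw, List.getLast?_cons_cons]
      exact ⟨hy, ih w hr hw' hx⟩

-- ---- negative-index helpers ----
theorem pyGet?_negIdx (xs : List Int) (j : Int) (h1 : -(xs.length : Int) ≤ j) (h2 : j < 0) :
    PySem.List.pyGet? xs j = xs[((xs.length : Int) + j).toNat]? := by
  have hk : j = -(((-j).toNat : Nat) : Int) := by omega
  rw [hk, PySem.List.pyGet?_neg_natCast _ _ (by omega) (by omega)]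
  congr 1
  omega

theorem pyGet?_append_negIdx (r u : List Int) (j : Int)
    (h1 : -(u.length : Int) ≤ j) (h2 : j < 0) :
    PySem.List.pyGet? (r ++ u) j = PySem.List.pyGet? u j := by
  rw [pyGet?_negIdx (r ++ u) j (by simp; omega) h2, pyGet?_negIdx u j h1 h2]
  have hge : r.length ≤ (((r ++ u).length : Int) + j).toNat := by simp; omega
  rw [List.getElem?_append_right hge]
  congr 1
  simp
  omega

theorem runF_getElem (l : List Int) (h : RunF l) (i : Nat) (hi : i + 1 < l.length) :
    l[i + 1]'hi = l[i]'(by omega) + 1 := by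
  induction l generalizing i with
  | nil => simp at hi
  | cons x t ih =>
    cases t with
    | nil => simp at hi
    | cons y t' =>
      obtain ⟨hy, hr⟩ : y = x + 1 ∧ RunF (y :: t') := h
      cases i with
      | zero => simpa using hy
      | succ k =>
        have := ih hr k (by simpa using hi)
        simpa using this

-- ---- characterization of the lead loop ----
theorem leadLoop_shift (n : Nat) : ∀ (s : List Int) (x : Int) (i : Nat), 1 ≤ i → s.length - i ≤ n →
    leadLoop (x :: s) (i + 1) = leadLoop s i + 1 := by
  induction n with
  | zero =>
    intro s x i h1 h2
    have hA : ¬ (i + 1 < (x :: s).length ∧ PySem.List.pyGet? (x :: s) ((i + 1 : Nat) : Int) =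
        (PySem.List.pyGet? (x :: s) (((i + 1 : Nat) : Int) - 1)).map (· + 1)) :=
      fun hcon => absurd hcon.1 (by simp only [List.length_cons]; omega)
    have hB : ¬ (i < s.length ∧ PySem.List.pyGet? s ((i : Nat) : Int) =
        (PySem.List.pyGet? s (((i : Nat) : Int) - 1)).map (· + 1)) :=
      fun hcon => absurd hcon.1 (by omega)
    rw [leadLoop, if_neg hA]
    conv_rhs => rw [leadLoop]
    rw [if_neg hB]
  | succ n ih =>
    intro s x i h1 h2
    have e1 : PySem.List.pyGet? (x :: s) ((i + 1 : Nat) : Int) = PySem.List.pyGet? s (i : Int) := by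
      have : ((i + 1 : Nat) : Int) = (i : Int) + 1 := by push_cast; ring
      rw [this, PySem.List.pyGet?_cons_succ]
    have e2 : PySem.List.pyGet? (x :: s) (((i + 1 : Nat) : Int) - 1) = PySem.List.pyGet? s ((i : Int) - 1) := by
      have h1' : ((i + 1 : Nat) : Int) - 1 = ((i - 1 : Nat) : Int) + 1 := by push_cast [h1]; omega
      have h2' : (i : Int) - 1 = ((i - 1 : Nat) : Int) := by push_cast [h1]; omega
      rw [h1', h2', PySem.List.pyGet?_cons_succ]
    by_cases hc : i < s.length ∧ PySem.List.pyGet? s (i : Int) = (PySem.List.pyGet? s ((i : Int) - 1)).map (· + 1)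
    · have hc' : i + 1 < (x :: s).length ∧ PySem.List.pyGet? (x :: s) ((i + 1 : Nat) : Int) =
          (PySem.List.pyGet? (x :: s) (((i + 1 : Nat) : Int) - 1)).map (· + 1) :=
        ⟨by simp only [List.length_cons]; exact Nat.succ_lt_succ hc.1, by rw [e1, e2]; exact hc.2⟩
      rw [leadLoop, if_pos hc']
      rw [ih s x (i + 1) (by omega) (by omega)]
      conv_rhs => rw [leadLoop]
      rw [if_pos hc]
    · have hc' : ¬ (i + 1 < (x :: s).length ∧ PySem.List.pyGet? (x :: s) ((i + 1 : Nat) : Int) =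
          (PySem.List.pyGet? (x :: s) (((i + 1 : Nat) : Int) - 1)).map (· + 1)) :=
        fun hcon => hc ⟨by have := hcon.1; simp only [List.length_cons] at this; omega,
          by rw [← e1, ← e2]; exact hcon.2⟩
      rw [leadLoop, if_neg hc']
      conv_rhs => rw [leadLoop]
      rw [if_neg hc]

theorem leadLoop_spec (t : List Int) (x : Int) :
    leadLoop (x :: t) 1 = 1 + (splitRun x t).1.length := by
  induction t generalizing x with
  | nil =>
    rw [leadLoop, if_neg (fun hcon => absurd hcon.1 (by simp))]
    simp [splitRun]
  | cons y t' ih =>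
    have g1 : PySem.List.pyGet? (x :: y :: t') (((1 : Nat)) : Int) = some y := by
      rw [PySem.List.pyGet?_natCast]; rfl
    have g0 : PySem.List.pyGet? (x :: y :: t') ((((1 : Nat)) : Int) - 1) = some x := by
      have h0 : (((1 : Nat)) : Int) - 1 = 0 := by norm_num
      rw [h0]
      exact PySem.List.pyGet?_zero_cons x (y :: t')
    by_cases hy : y = x + 1
    · have hcond : 1 < (x :: y :: t').length ∧ PySem.List.pyGet? (x :: y :: t') (((1 : Nat)) : Int) =
          (PySem.List.pyGet? (x :: y :: t') ((((1 : Nat)) : Int) - 1)).map (· + 1) :=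
        ⟨by simp, by rw [g1, g0]; simp [hy]⟩
      rw [leadLoop, if_pos hcond]
      rw [leadLoop_shift t'.length (y :: t') x 1 (by omega) (by simp)]
      rw [ih y]
      simp only [splitRun, if_pos hy, List.length_cons]
      omega
    · have hncond : ¬ (1 < (x :: y :: t').length ∧ PySem.List.pyGet? (x :: y :: t') (((1 : Nat)) : Int) =
          (PySem.List.pyGet? (x :: y :: t') ((((1 : Nat)) : Int) - 1)).map (· + 1)) :=
        fun hcon => hy (by have h2 := hcon.2; rw [g1, g0] at h2; simpa using h2)
      rw [leadLoop, if_neg hncond]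
      simp [splitRun, hy]

-- ---- characterization of the trail loop ----
theorem trailLoop_range (l : List Int) (j : Int) (h : -(l.length : Int) ≤ j) :
    -(l.length : Int) ≤ trailLoop l j ∧ trailLoop l j ≤ j := by
  rw [trailLoop]
  split
  · rename_i hc
    have := trailLoop_range l (j - 1) (by omega)
    omega
  · omega
termination_by ((l.length : Int) + j).toNat
decreasing_by omega

theorem trailLoop_run (l : List Int) (hr : RunF l) (j : Int)
    (h1 : -(l.length : Int) ≤ j) (h2 : j ≤ -1) : trailLoop l j = -(l.length : Int) := by
  rw [trailLoop]
  by_cases hj : -(l.length : Int) < j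
  · have hcond : PySem.List.pyGet? l j = (PySem.List.pyGet? l (j - 1)).map (· + 1) := by
      rw [pyGet?_negIdx l j h1 (by omega), pyGet?_negIdx l (j - 1) (by omega) (by omega)]
      rw [show ((l.length : Int) + j).toNat = ((l.length : Int) + (j - 1)).toNat + 1 by omega]
      rw [List.getElem?_eq_getElem (show ((l.length : Int) + (j - 1)).toNat + 1 < l.length by omega),
          List.getElem?_eq_getElem (show ((l.length : Int) + (j - 1)).toNat < l.length by omega)]
      simp only [Option.map_some, Option.some_inj]
      exact runF_getElem l hr _ _
    rw [dif_pos ⟨hj, hcond⟩]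
    exact trailLoop_run l hr (j - 1) (by omega) (by omega)
  · rw [dif_neg (fun hcon => hj hcon.1)]
    omega
termination_by ((l.length : Int) + j).toNat
decreasing_by omega

theorem trailLoop_append (r u : List Int) (j : Int) (hr : r ≠ []) (hu : u ≠ [])
    (hjunc : ∀ (y w : Int), u[0]? = some y → r.getLast? = some w → y ≠ w + 1)
    (h1 : -(u.length : Int) ≤ j) (h2 : j ≤ -1) :
    trailLoop (r ++ u) j = trailLoop u j := by
  have hrlen : 0 < r.length := List.length_pos_of_ne_nil hr
  have hulen : 0 < u.length := List.length_pos_of_ne_nil hu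
  by_cases hj : -(u.length : Int) < j
  · have e1 : PySem.List.pyGet? (r ++ u) j = PySem.List.pyGet? u j :=
      pyGet?_append_negIdx r u j (by omega) (by omega)
    have e2 : PySem.List.pyGet? (r ++ u) (j - 1) = PySem.List.pyGet? u (j - 1) :=
      pyGet?_append_negIdx r u (j - 1) (by omega) (by omega)
    by_cases hc : PySem.List.pyGet? u j = (PySem.List.pyGet? u (j - 1)).map (· + 1)
    · rw [trailLoop, dif_pos ⟨by simp; omega, by rw [e1, e2]; exact hc⟩]
      rw [trailLoop_append r u (j - 1) hr hu hjunc (by omega) (by omega)]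
      conv_rhs => rw [trailLoop]
      rw [dif_pos ⟨hj, hc⟩]
    · rw [trailLoop, dif_neg (fun hcon => hc (by rw [← e1, ← e2]; exact hcon.2))]
      conv_rhs => rw [trailLoop]
      rw [dif_neg (fun hcon => hc hcon.2)]
  · have hju : j = -(u.length : Int) := by omega
    have hc2 : ¬ (PySem.List.pyGet? (r ++ u) j = (PySem.List.pyGet? (r ++ u) (j - 1)).map (· + 1)) := by
      rw [pyGet?_negIdx (r ++ u) j (by simp; omega) (by omega),
          pyGet?_negIdx (r ++ u) (j - 1) (by simp; omega) (by omega)]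
      rw [show (((r ++ u).length : Int) + j).toNat = r.length by simp; omega]
      rw [show (((r ++ u).length : Int) + (j - 1)).toNat = r.length - 1 by simp; omega]
      have hy : (r ++ u)[r.length]? = u[0]? := by
        rw [List.getElem?_append_right (Nat.le_refl _)]
        simp
      have hz : (r ++ u)[r.length - 1]? = r.getLast? := by
        rw [List.getElem?_append_left (by omega), List.getLast?_eq_getElem?]
      rw [hy, hz]
      cases hu0 : u[0]? with
      | none =>
        exfalso
        rw [List.getElem?_eq_none_iff] at hu0
        omega
      | some y =>
        cases hw0 : r.getLast? with
        | none =>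
          exfalso
          rw [List.getLast?_eq_none_iff] at hw0
          exact hr hw0
        | some w =>
          simp only [Option.map_some, Option.some_inj]
          exact hjunc y w hu0 hw0
    rw [trailLoop, dif_neg (fun hcon => hc2 hcon.2)]
    conv_rhs => rw [trailLoop]
    rw [dif_neg (fun hcon => hj hcon.1)]
termination_by ((u.length : Int) + j).toNat
decreasing_by omega

theorem take_len_add {α : Type} (l1 l2 : List α) (n : Nat) :
    List.take (l1.length + n) (l1 ++ l2) = l1 ++ List.take n l2 := by
  rw [List.take_append, List.take_of_length_le (by omega)]
  have h : l1.length + n - l1.length = n := by omega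
  rw [h]

-- ---- slice helpers ----
theorem slice_to_negIdx (xs : List Int) (j : Int) (hj : j ≤ -1) :
    PySem.List.slice xs none (some j) = xs.take (((xs.length : Int) + j).toNat) := by
  have hk : j = -(((-j).toNat : Nat) : Int) := by omega
  rw [hk, PySem.List.slice_to_neg_natCast _ _ (by omega)]
  congr 1
  omega

theorem slice_one_negone {α : Type} (xs : List α) :
    PySem.List.slice xs (some 1) (some (-1)) = xs.tail.dropLast := by
  cases xs with
  | nil => rfl
  | cons x t =>
    simp only [PySem.List.slice, PySem.List.clampIdx]
    rw [if_neg (by norm_num : ¬ ((1 : Int) < 0)), if_pos (by norm_num : ((-1 : Int)) < 0)]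
    rw [if_neg (show ¬ (((x :: t).length : Int) + -1 < 0) by simp)]
    rw [show (((x :: t).length : Int) + -1).toNat = t.length by simp]
    rw [show min (1 : Int).toNat (x :: t).length = 1 by simp]
    simp [List.dropLast_eq_take]

-- ---- the trailing trim equals dropping the last run ----
theorem trailTrim_spec (t : List Int) :
    PySem.List.slice t none (some (trailLoop t (-1))) = ((runsOf t).dropLast).flatten := by
  cases t with
  | nil =>
    rw [trailLoop, dif_neg (fun hcon => by have := hcon.1; simp at this)]
    rw [show runsOf ([] : List Int) = [] from by rw [runsOf]]
    simp [PySem.List.slice]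
  | cons x t0 =>
    have hsplit : (splitRun x t0).1 ++ (splitRun x t0).2 = t0 := splitRun_append t0 x
    have hrun : RunF (x :: (splitRun x t0).1) := splitRun_run t0 x
    have hruns : runsOf (x :: t0) = (x :: (splitRun x t0).1) :: runsOf (splitRun x t0).2 := by
      rw [runsOf]
    rw [hruns]
    cases hb : (splitRun x t0).2 with
    | nil =>
      have hrF : RunF (x :: t0) := by
        have ht : (splitRun x t0).1 = t0 := by
          conv_rhs => rw [← hsplit, hb, List.append_nil]
        rw [← ht]
        exact hrun
      rw [trailLoop_run (x :: t0) hrF (-1) (by simp only [List.length_cons]; omega) (by omega)]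
      rw [slice_to_negIdx _ _ (by simp only [List.length_cons]; omega)]
      rw [show ((((x :: t0).length : Int)) + -(((x :: t0).length : Int))).toNat = 0 by omega]
      rw [show runsOf ([] : List Int) = [] from by rw [runsOf]]
      simp
    | cons y b' =>
      have htapp : x :: t0 = (x :: (splitRun x t0).1) ++ (y :: b') := by
        rw [← hb]
        exact congrArg (x :: ·) hsplit.symm
      have hjunc : ∀ (z w : Int), (y :: b')[0]? = some z → (x :: (splitRun x t0).1).getLast? = some w → z ≠ w + 1 := by
        intro z w hz hw
        have hz' : y = z := by simpa using hz
        subst hz'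
        exact splitRun_junction t0 x y b' hb w hw
      rw [htapp]
      rw [trailLoop_append (x :: (splitRun x t0).1) (y :: b') (-1) (by simp) (by simp) hjunc
        (by simp only [List.length_cons]; omega) (by omega)]
      have hrange := trailLoop_range (y :: b') (-1) (by simp only [List.length_cons]; omega)
      obtain ⟨hr1, hr2⟩ := hrange
      rw [slice_to_negIdx _ _ hr2]
      have hnil : runsOf (y :: b') ≠ [] := by rw [runsOf]; simp
      rw [List.dropLast_cons_of_ne_nil hnil, List.flatten_cons]
      rw [show ((((x :: (splitRun x t0).1) ++ (y :: b')).length : Int) + trailLoop (y :: b') (-1)).toNat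
            = (x :: (splitRun x t0).1).length + (((y :: b').length : Int) + trailLoop (y :: b') (-1)).toNat by
          rw [show (((x :: (splitRun x t0).1) ++ (y :: b')).length : Int)
                = ((x :: (splitRun x t0).1).length : Int) + ((y :: b').length : Int) by
              push_cast [List.length_append]; ring]
          omega]
      rw [take_len_add]
      congr 1
      rw [← slice_to_negIdx _ _ hr2]
      exact trailTrim_spec (y :: b')
termination_by t.length
decreasing_by
  have := congrArg List.length hsplit
  rw [hb] at this
  simp at this ⊢
  omega

-- ---- B's fold builds runsOf ----
theorem runsOf_single (c : Int) (a : List Int) (h : RunF (c :: a)) : runsOf (c :: a) = [c :: a] := by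
  rw [runsOf, splitRun_of_runF a c h]
  rw [show runsOf ([] : List Int) = [] from by rw [runsOf]]

theorem bfold_spec (s : List Int) : ∀ (runs : List (List Int)) (cur : List Int),
    cur ≠ [] → RunF cur →
    (if (s.foldl bstep (runs, cur)).2 ≠ [] then
        (s.foldl bstep (runs, cur)).1 ++ [(s.foldl bstep (runs, cur)).2]
      else (s.foldl bstep (runs, cur)).1) = runs ++ runsOf (cur ++ s) := by
  induction s with
  | nil =>
    intro runs cur hne hr
    simp only [List.foldl_nil, List.append_nil]
    rw [if_pos hne]
    cases cur with
    | nil => exact absurd rfl hne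
    | cons c a => rw [runsOf_single c a hr]
  | cons z s' ih =>
    intro runs cur hne hr
    simp only [List.foldl_cons]
    by_cases hc : cur ≠ [] ∧ some z = (PySem.List.pyGet? cur (-1)).map (· + 1)
    · have hstep : bstep (runs, cur) z = (runs, cur ++ [z]) := by rw [bstep, if_pos hc]
      rw [hstep]
      have hc2 := hc.2
      rw [PySem.List.pyGet?_neg_one] at hc2
      cases hw : cur.getLast? with
      | none =>
        exfalso
        rw [List.getLast?_eq_none_iff] at hw
        exact hne hw
      | some w =>
        rw [hw] at hc2
        have hz : z = w + 1 := by simpa using hc2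
        have hr' : RunF (cur ++ [z]) := runF_append_last cur z w hr hw hz
        rw [ih runs (cur ++ [z]) (by simp) hr']
        rw [show (cur ++ [z]) ++ s' = cur ++ z :: s' by simp]
    · have hP : ¬ some z = (PySem.List.pyGet? cur (-1)).map (· + 1) := fun p => hc ⟨hne, p⟩
      have hstep : bstep (runs, cur) z = (runs ++ [cur], [z]) := by
        rw [bstep, if_neg hc]
        simp [hne]
      rw [hstep, ih (runs ++ [cur]) [z] (by simp) trivial]
      rw [PySem.List.pyGet?_neg_one] at hP
      cases cur with
      | nil => exact absurd rfl hne
      | cons c a =>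
        have hz : ∀ w, (c :: a).getLast? = some w → z ≠ w + 1 := by
          intro w hw hcontra
          exact hP (by rw [hw, hcontra]; simp)
        have hbreak : runsOf ((c :: a) ++ z :: s') = (c :: a) :: runsOf (z :: s') := by
          rw [show (c :: a) ++ z :: s' = c :: (a ++ z :: s') from rfl, runsOf,
            splitRun_break a c z s' hr hz]
        rw [hbreak]
        simp

-- ===== VERDICT (by name: the statement is the Claim_ definition above) =====
theorem trim_leading_trailing_spec : Claim_equal_trim_leading_trailing := by
  intro l _
  unfold Spec_trim_leading_trailing trim_leading_trailing trim_leading_trailing_alt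
  dsimp only
  generalize PySem.List.sorted l (fun x => x) false = s
  cases s with
  | nil =>
    rw [leadLoop, if_neg (fun hcon => absurd hcon.1 (by simp))]
    rw [PySem.List.slice_from_natCast]
    rw [trailLoop, dif_neg (fun hcon => by have := hcon.1; simp at this)]
    rfl
  | cons x t =>
    rw [leadLoop_spec t x, PySem.List.slice_from_natCast]
    have hdrop : (x :: t).drop (1 + (splitRun x t).1.length) = (splitRun x t).2 := by
      rw [show 1 + (splitRun x t).1.length = (splitRun x t).1.length + 1 from Nat.add_comm _ _]
      rw [List.drop_succ_cons]
      obtain ⟨p1, p2, hp⟩ : ∃ p1 p2, splitRun x t = (p1, p2) := ⟨_, _, rfl⟩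
      have happ : p1 ++ p2 = t := by rw [← splitRun_append t x, hp]
      rw [hp, ← happ]
      exact List.drop_left
    rw [hdrop, trailTrim_spec ((splitRun x t).2)]
    have hstep0 : bstep ([], []) x = ([], [x]) := by
      rw [bstep, if_neg (by simp)]
      simp
    rw [List.foldl_cons, hstep0, bfold_spec t [] [x] (by simp) trivial]
    rw [List.nil_append, show [x] ++ t = x :: t from rfl]
    rw [slice_one_negone]
    rw [show runsOf (x :: t) = (x :: (splitRun x t).1) :: runsOf (splitRun x t).2 from by rw [runsOf]]
    rw [List.tail_cons]
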